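-- pv_equiv track=rewrite | github.com/wherby/code | algorithm/技巧/寻找子序列/变化字符串查找子序列.py | calcInsertT
-- ===== SOURCE A (Python) =====
-- def calcInsertT(s: str) -> int:
--     cnt_t = s.count('T')  # s[i+1] 到 s[n-1] 的 'T' 的个数
--     cnt_l = 0  # s[0] 到 s[i] 的 'L' 的个数
--     res = 0
--     for c in s:
--         if c == 'T':
--             cnt_t -= 1
--         if c == 'L':
--             cnt_l += 1
--         res = max(res, cnt_l * cnt_t)
--     return res
-- ===== SOURCE B (Python) =====
-- def calcInsertT(s: str) -> int:
--     # prefix table: lpre[i] = number of 'L' in s[0..i]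
--     lpre = []
--     run = 0
--     for c in s:
--         if c == 'L':
--             run += 1
--         lpre.append(run)
--     # suffix table: tsuf[i] = number of 'T' in s[i+1..]
--     tsuf = []
--     run = 0
--     for c in reversed(s):
--         tsuf.append(run)
--         if c == 'T':
--             run += 1
--     tsuf.reverse()
--     res = 0
--     for a, b in zip(lpre, tsuf):
--         res = max(res, a * b)
--     return res
-- ===== Notes on version B (the rewrite author's own statement) =====
-- stated objective: alternative
-- what changed: Replaces the single scan with interleaved running counters by three separate passes: build a prefix table of L-counts, build a suffix table of T-counts right-to-left, then take the max of pointwise products.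
import Mathlib
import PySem

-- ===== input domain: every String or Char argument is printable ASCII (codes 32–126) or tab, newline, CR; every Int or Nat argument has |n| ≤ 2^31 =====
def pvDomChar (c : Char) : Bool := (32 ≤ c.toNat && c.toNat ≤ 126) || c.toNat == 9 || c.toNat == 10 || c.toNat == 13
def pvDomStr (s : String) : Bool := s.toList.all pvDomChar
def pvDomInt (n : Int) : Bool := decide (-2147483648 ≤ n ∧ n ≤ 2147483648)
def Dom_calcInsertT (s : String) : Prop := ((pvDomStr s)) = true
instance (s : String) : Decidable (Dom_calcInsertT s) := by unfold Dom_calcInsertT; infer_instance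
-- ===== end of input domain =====

-- B builds explicit prefix-'L' and suffix-'T' count tables in separate passes and then maxes
-- the pointwise products, instead of A's single scan with interleaved running counters.

-- ===== PORT A =====
def calcInsertT (s : String) : Int :=
  let cntT0 : Int := (PySem.Str.count s "T" : Int)
  let st := s.toList.foldl (fun (st : Int × Int × Int) c =>
    let ct := if c = 'T' then st.1 - 1 else st.1
    let cl := if c = 'L' then st.2.1 + 1 else st.2.1
    (ct, cl, max st.2.2 (cl * ct))) (cntT0, 0, 0)
  st.2.2

-- ===== PORT B =====
def calcInsertT_alt (s : String) : Int :=
  let cs := s.toList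
  let lpre := (cs.foldl (fun (st : List Int × Int) c =>
      let run := if c = 'L' then st.2 + 1 else st.2
      (st.1 ++ [run], run)) ([], 0)).1
  let tsuf := ((cs.reverse.foldl (fun (st : List Int × Int) c =>
      (st.1 ++ [st.2], if c = 'T' then st.2 + 1 else st.2)) ([], 0)).1).reverse
  (lpre.zip tsuf).foldl (fun r p => max r (p.1 * p.2)) 0

-- ===== PRECONDITION & SPEC =====
def Spec_calcInsertT (s : String) (out : Int) : Prop := out = calcInsertT_alt s
instance (s : String) (out : Int) : Decidable (Spec_calcInsertT s out) := by unfold Spec_calcInsertT; infer_instance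

-- ===== CLAIM (what is proved, stated in full; the proofs are below) =====
def Claim_equal_calcInsertT : Prop := ∀ (s : String), Dom_calcInsertT s → Spec_calcInsertT s (calcInsertT s)

-- ===== LEMMAS AND PROOFS =====

/-- Products cl'·ct' along the prefixes, starting from counters ct, cl. -/
def pVals (ct cl : Int) : List Char → List Int
  | [] => []
  | c :: r =>
    let ct' := if c = 'T' then ct - 1 else ct
    let cl' := if c = 'L' then cl + 1 else cl
    cl' * ct' :: pVals ct' cl' r

/-- Running prefix 'L' counts starting at cl. -/
def pL (cl : Int) : List Char → List Int
  | [] => []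
  | c :: r =>
    let cl' := if c = 'L' then cl + 1 else cl
    cl' :: pL cl' r

/-- Suffix 'T' counts plus an offset run. -/
def sTk (run : Int) : List Char → List Int
  | [] => []
  | c :: r => (run + (r.count 'T' : Int)) :: sTk run r

/-- Values emitted by B's reversed pass before the final reverse. -/
def revT (run : Int) : List Char → List Int
  | [] => []
  | c :: r => run :: revT (if c = 'T' then run + 1 else run) r

theorem go_single (c : Char) : ∀ (fuel : Nat) (l : List Char) (acc : Nat),
    l.length ≤ fuel → PySem.Chars.count.go [c] fuel l acc = acc + l.count c := by
  intro fuel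
  induction fuel with
  | zero => intro l acc h; cases l <;> simp_all [PySem.Chars.count.go]
  | succ n ih =>
    intro l acc h
    cases l with
    | nil => simp [PySem.Chars.count.go]
    | cons x t =>
      have ht : t.length ≤ n := by simpa using Nat.le_of_succ_le_succ h
      by_cases hx : c = x
      · subst hx
        simp only [PySem.Chars.count.go, List.isPrefixOf, BEq.rfl, Bool.true_and,
          List.isPrefixOf_nil_left, if_true, List.length_cons, List.length_nil,
          Nat.zero_add, List.drop_one, List.tail_cons]
        rw [ih t (acc + 1) ht]
        simp [List.count_cons]
        omega
      · have hb : (c == x) = false := by simp [hx]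
        simp only [PySem.Chars.count.go, List.isPrefixOf, hb, Bool.false_and,
          Bool.false_eq_true, if_false]
        rw [ih t acc ht]
        simp [List.count_cons, Ne.symm hx]

theorem count_single (cs : List Char) (c : Char) :
    PySem.Chars.count cs [c] = cs.count c := by
  rw [PySem.Chars.count]
  simp only [List.isEmpty_cons, if_false]
  rw [go_single c cs.length cs 0 le_rfl]
  simp

theorem foldA (cs : List Char) : ∀ (ct cl r : Int),
    (cs.foldl (fun (st : Int × Int × Int) c =>
      let ct := if c = 'T' then st.1 - 1 else st.1
      let cl := if c = 'L' then st.2.1 + 1 else st.2.1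
      (ct, cl, max st.2.2 (cl * ct))) (ct, cl, r)).2.2
    = (pVals ct cl cs).foldl max r := by
  induction cs with
  | nil => intro ct cl r; simp [pVals]
  | cons c t ih => intro ct cl r; simp only [List.foldl, pVals]; rw [ih]

theorem foldL (cs : List Char) : ∀ (acc : List Int) (cl : Int),
    (cs.foldl (fun (st : List Int × Int) c =>
      let run := if c = 'L' then st.2 + 1 else st.2
      (st.1 ++ [run], run)) (acc, cl)).1 = acc ++ pL cl cs := by
  induction cs with
  | nil => intro acc cl; simp [pL]
  | cons c t ih => intro acc cl; simp only [List.foldl, pL]; rw [ih]; simp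

theorem foldR (cs : List Char) : ∀ (acc : List Int) (run : Int),
    (cs.foldl (fun (st : List Int × Int) c =>
      (st.1 ++ [st.2], if c = 'T' then st.2 + 1 else st.2)) (acc, run)).1
    = acc ++ revT run cs := by
  induction cs with
  | nil => intro acc run; simp [revT]
  | cons c t ih => intro acc run; simp only [List.foldl, revT]; rw [ih]; simp

theorem sTk_append (run : Int) (x : Char) : ∀ (xs : List Char),
    sTk run (xs ++ [x]) = sTk (if x = 'T' then run + 1 else run) xs ++ [run] := by
  intro xs
  induction xs with
  | nil => simp [sTk]
  | cons c t ih =>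
    simp only [List.cons_append, sTk, ih, List.cons_append]
    congr 1
    simp [List.count_append, List.count_cons]
    by_cases hx : x = 'T' <;> simp [hx] <;> push_cast <;> ring

theorem revT_reverse (cs : List Char) : ∀ (run : Int),
    (revT run cs.reverse).reverse = sTk run cs := by
  induction cs using List.reverseRecOn with
  | nil => intro run; simp [revT, sTk]
  | append_singleton t x ih =>
    intro run
    have e : (t ++ [x]).reverse = x :: t.reverse := by simp
    rw [e]
    simp only [revT, List.reverse_cons]
    rw [ih, sTk_append]

theorem zipPL (cs : List Char) : ∀ (cl run : Int),
    pVals (run + (cs.count 'T' : Int)) cl cs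
    = ((pL cl cs).zip (sTk run cs)).map (fun p => p.1 * p.2) := by
  induction cs with
  | nil => intro cl run; simp [pVals, pL, sTk]
  | cons c t ih =>
    intro cl run
    simp only [pVals, pL, sTk, List.zip_cons_cons, List.map_cons]
    have h : (if c = 'T' then run + (List.count 'T' (c :: t) : Int) - 1
        else run + (List.count 'T' (c :: t) : Int)) = run + (t.count 'T' : Int) := by
      by_cases hc : c = 'T' <;> simp [hc, List.count_cons] <;> push_cast <;> ring
    rw [h, ih]

-- ===== VERDICT (by name: the statement is the Claim_ definition above) =====
theorem calcInsertT_spec : Claim_equal_calcInsertT := by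
  intro s _
  unfold Spec_calcInsertT calcInsertT calcInsertT_alt
  simp only []
  rw [foldA, foldL, foldR, List.nil_append, List.nil_append, revT_reverse]
  have hc : (PySem.Str.count s "T" : Int) = ((s.toList.count 'T' : Nat) : Int) := by
    have := count_single s.toList 'T'
    simp [PySem.Str.count] at this ⊢
    omega
  rw [hc, show ((s.toList.count 'T' : Nat) : Int) = 0 + (s.toList.count 'T' : Nat) by ring]
  rw [zipPL, List.foldl_map]
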